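-- pv_equiv track=rewrite | github.com/pypi-data/pypi-mirror-368 | packages/codepub/codepub-2.3-py3-none-any.whl/codepub/functions.py | find_possible_k_values
-- ===== SOURCE A (Python) =====
-- def factorial(num: "int") -> "int":
--
--     """
--     Calculates factorial of the given number.
--
--     Parameters:
--     - num (int) - given number
--
--     Returns:
--     - fact (int) - its factorial
--     """
--
--     if num == 0:
--         return 1
--     else:
--         return num * factorial(num-1)
--
-- def combination(m: "int", k: "int") -> "int":
--
--     """
--     Finds number of possible combinations.
--
--     Parameters:
--     - m (int) - number of pools
--     - k (int) - address weight
--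
--     Returns:
--     - n (int) - maximum number of combinations given m and k
--     """
--
--     return factorial(m) // (factorial(k) * factorial(m - k))
--
-- def find_possible_k_values(m: "int", n: "int") -> "list[int]":
--
--     """
--     Finds possible address weights r given number of pools m and number of items n
--
--     Parameters:
--     - m (int) - number of pools
--     - n (int) - number of items
--
--     Returns:
--     - k_values (list) - list with possible r
--     """
--
--     k_values = []
--     k = 0
--
--     while k <= m:
--         c = combination(m, k)
--         if c >= n:
--             break
--         k += 1
--
--     while k <= m:
--         if combination(m, k) >= n:
--             k_values.append(k)
--         else:
--             break
--         k += 1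
--
--     return k_values
-- ===== SOURCE B (Python) =====
-- def find_possible_k_values(m: "int", n: "int") -> "list[int]":
--     """Single pass: binomials computed incrementally via C(m,k+1) = C(m,k)*(m-k)//(k+1)."""
--     k_values = []
--     c = 1  # C(m, 0)
--     for k in range(m + 1):
--         if c >= n:
--             k_values.append(k)
--         elif k_values:
--             break
--         c = c * (m - k) // (k + 1)
--     return k_values
-- ===== Notes on version B (the rewrite author's own statement) =====
-- stated objective: faster
-- what changed: A recomputes each binomial from three recursive factorials; B makes one pass maintaining C(m,k) incrementally via C(m,k+1)=C(m,k)*(m-k)//(k+1).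
import Mathlib
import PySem

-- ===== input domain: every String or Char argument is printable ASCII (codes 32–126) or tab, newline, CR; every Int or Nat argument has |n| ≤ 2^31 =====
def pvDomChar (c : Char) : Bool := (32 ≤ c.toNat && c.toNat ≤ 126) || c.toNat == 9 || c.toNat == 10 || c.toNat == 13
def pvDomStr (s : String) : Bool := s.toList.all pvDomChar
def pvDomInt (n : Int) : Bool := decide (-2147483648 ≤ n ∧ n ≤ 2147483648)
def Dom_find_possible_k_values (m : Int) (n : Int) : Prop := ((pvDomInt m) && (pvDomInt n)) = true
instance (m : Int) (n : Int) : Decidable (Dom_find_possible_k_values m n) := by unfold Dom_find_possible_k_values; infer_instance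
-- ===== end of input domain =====

-- B replaces A's per-k factorial-based binomial (three recursive factorials per step) by one pass
-- updating C(m,k) incrementally via C(m,k+1) = C(m,k)*(m-k)//(k+1); objective: faster.

-- ===== PORT A =====
-- factorial(num); exact for num ≥ 0 (the only arguments A reaches inside Pre_);
-- on negative num Python recurses without end (RecursionError), here it returns 0.
def pyFactorial (num : Int) : Int :=
  if num = 0 then 1
  else if num < 0 then 0
  else num * pyFactorial (num - 1)
termination_by num.toNat
decreasing_by omega

-- combination(m, k)
def combination (m : Int) (k : Int) : Int :=
  PySem.Int.floordiv (pyFactorial m) (pyFactorial k * pyFactorial (m - k))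

-- first while loop of A: advance k until combination(m,k) >= n or k > m (fuel = loop bound)
def aLoop1 (m n : Int) : Nat → Int → Int
  | 0, k => k
  | f + 1, k =>
    if k ≤ m then
      (if n ≤ combination m k then k else aLoop1 m n f (k + 1))
    else k

-- second while loop of A: append k while combination(m,k) >= n
def aLoop2 (m n : Int) : Nat → Int → List Int → List Int
  | 0, _, acc => acc
  | f + 1, k, acc =>
    if k ≤ m then
      (if n ≤ combination m k then aLoop2 m n f (k + 1) (acc ++ [k]) else acc)
    else acc

def find_possible_k_values (m : Int) (n : Int) : List Int :=
  aLoop2 m n (m + 1).toNat (aLoop1 m n (m + 1).toNat 0) []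

-- ===== PORT B =====
-- for k in range(m+1) with break; state (k_values, c), c = c*(m-k)//(k+1) each iteration
def bLoop (m n : Int) : Nat → Int → Int → List Int → List Int
  | 0, _, _, acc => acc
  | f + 1, k, c, acc =>
    if k < m + 1 then
      (if n ≤ c then bLoop m n f (k + 1) (PySem.Int.floordiv (c * (m - k)) (k + 1)) (acc ++ [k])
       else if acc.isEmpty then bLoop m n f (k + 1) (PySem.Int.floordiv (c * (m - k)) (k + 1)) acc
       else acc)
    else acc

def find_possible_k_values_alt (m : Int) (n : Int) : List Int :=
  bLoop m n (m + 1).toNat 0 1 []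

-- ===== PRECONDITION & SPEC =====
-- Pre_ excludes exactly m ≥ 996, the inputs on which A's factorial recursion (depth m+1)
-- exceeds CPython's default recursion limit of 1000 and A raises RecursionError
-- (measured: A returns for every m ≤ 995 and raises at m = 996); under a raised limit A
-- would return further, but 996 is the crash point of A as shipped.
def Pre_find_possible_k_values (m : Int) (n : Int) : Prop := m ≤ 995
instance (m : Int) (n : Int) : Decidable (Pre_find_possible_k_values m n) := by unfold Pre_find_possible_k_values; infer_instance
def pvWitness_find_possible_k_values : Int × Int := (5, 4)

def Spec_find_possible_k_values (m : Int) (n : Int) (out : List Int) : Prop := out = find_possible_k_values_alt m n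
instance (m : Int) (n : Int) (out : List Int) : Decidable (Spec_find_possible_k_values m n out) := by unfold Spec_find_possible_k_values; infer_instance

-- ===== CLAIM (what is proved, stated in full; the proofs are below) =====
def Claim_equal_find_possible_k_values : Prop := ∀ (m : Int) (n : Int), Dom_find_possible_k_values m n → Pre_find_possible_k_values m n → Spec_find_possible_k_values m n (find_possible_k_values m n)

-- ===== LEMMAS AND PROOFS =====

-- reference loop: B's control structure with the binomial recomputed as A computes it
def phase (m n : Int) : Nat → Int → List Int → List Int
  | 0, _, acc => acc
  | f + 1, k, acc =>
    if k < m + 1 then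
      (if n ≤ combination m k then phase m n f (k + 1) (acc ++ [k])
       else if acc.isEmpty then phase m n f (k + 1) acc
       else acc)
    else acc

theorem pyFactorial_natCast (a : Nat) : pyFactorial (a : Int) = (Nat.factorial a : Int) := by
  induction a with
  | zero => simp [pyFactorial, Nat.factorial]
  | succ b ih =>
    rw [pyFactorial]
    have h1 : ¬((b + 1 : Nat) : Int) = 0 := by omega
    have h2 : ¬((b + 1 : Nat) : Int) < 0 := by omega
    have h3 : ((b + 1 : Nat) : Int) - 1 = (b : Int) := by omega
    rw [if_neg h1, if_neg h2, h3, ih, Nat.factorial]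
    push_cast
    ring

theorem combination_eq_choose (m k : Int) (hk : 0 ≤ k) (hkm : k ≤ m) :
    combination m k = (Nat.choose m.toNat k.toNat : Int) := by
  have hm : 0 ≤ m := le_trans hk hkm
  have hmk : m - k = ((m.toNat - k.toNat : Nat) : Int) := by omega
  have hkk : k = (k.toNat : Int) := by omega
  have hmm : m = (m.toNat : Int) := by omega
  have f1 : pyFactorial m = ((Nat.factorial m.toNat : Nat) : Int) := by
    conv_lhs => rw [hmm]
    exact pyFactorial_natCast m.toNat
  have f2 : pyFactorial k = ((Nat.factorial k.toNat : Nat) : Int) := by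
    conv_lhs => rw [hkk]
    exact pyFactorial_natCast k.toNat
  have f3 : pyFactorial (m - k) = ((Nat.factorial (m.toNat - k.toNat) : Nat) : Int) := by
    rw [hmk]
    exact pyFactorial_natCast (m.toNat - k.toNat)
  unfold combination
  rw [f1, f2, f3]
  have hle : k.toNat ≤ m.toNat := by omega
  have hfac : (m.toNat).factorial =
      (Nat.choose m.toNat k.toNat) * ((k.toNat).factorial * (m.toNat - k.toNat).factorial) := by
    rw [← Nat.choose_mul_factorial_mul_factorial hle]; ring
  have hpos : (0 : Int) < ((k.toNat).factorial : Int) * ((m.toNat - k.toNat).factorial : Int) := by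
    positivity
  rw [PySem.Int.floordiv_eq_ediv_of_pos hpos]
  rw [hfac]
  push_cast
  exact Int.mul_ediv_cancel _ (by positivity)

theorem combination_zero (m : Int) (hm : 0 ≤ m) : combination m 0 = 1 := by
  rw [combination_eq_choose m 0 le_rfl hm]
  simp

theorem combination_step (m k : Int) (hk : 0 ≤ k) (hkm : k + 1 ≤ m) :
    PySem.Int.floordiv (combination m k * (m - k)) (k + 1) = combination m (k + 1) := by
  rw [combination_eq_choose m k hk (by omega), combination_eq_choose m (k + 1) (by omega) hkm]
  have h1 : (k + 1).toNat = k.toNat + 1 := by omega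
  have h2 : m - k = ((m.toNat - k.toNat : Nat) : Int) := by omega
  have hk' : (k.toNat : Int) = k := Int.toNat_of_nonneg hk
  have hc := Nat.choose_succ_right_eq m.toNat k.toNat
  have hcZ : ((Nat.choose m.toNat (k.toNat + 1) : Nat) : Int) * ((k.toNat : Int) + 1)
      = ((Nat.choose m.toNat k.toNat : Nat) : Int) * ((m.toNat - k.toNat : Nat) : Int) := by
    exact_mod_cast hc
  rw [hk', ← h2] at hcZ
  have hmul : (Nat.choose m.toNat k.toNat : Int) * (m - k) =
      (Nat.choose m.toNat (k.toNat + 1) : Int) * (k + 1) := hcZ.symm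
  rw [hmul, h1]
  have hpos : (0 : Int) < k + 1 := by omega
  rw [PySem.Int.floordiv_eq_ediv_of_pos hpos, Int.mul_ediv_cancel _ (by omega)]

-- B's loop with c = C(m,k) maintained incrementally equals the reference loop
theorem bLoop_eq_phase (m n : Int) : ∀ (f : Nat) (k c : Int) (acc : List Int),
    0 ≤ k → (k ≤ m → c = combination m k) → bLoop m n f k c acc = phase m n f k acc := by
  intro f
  induction f with
  | zero => intro k c acc _ _; rfl
  | succ f ih =>
    intro k c acc hk hc
    rw [bLoop, phase]
    by_cases hkm : k < m + 1
    · rw [if_pos hkm, if_pos hkm]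
      have hc' : c = combination m k := hc (by omega)
      subst hc'
      have hnext : k + 1 ≤ m → PySem.Int.floordiv (combination m k * (m - k)) (k + 1) = combination m (k + 1) :=
        fun h => combination_step m k hk h
      by_cases hn : n ≤ combination m k
      · rw [if_pos hn, if_pos hn]
        exact ih (k + 1) _ (acc ++ [k]) (by omega) hnext
      · rw [if_neg hn, if_neg hn]
        by_cases he : acc.isEmpty
        · rw [if_pos he, if_pos he]
          exact ih (k + 1) _ acc (by omega) hnext
        · rw [if_neg he, if_neg he]
    · rw [if_neg hkm, if_neg hkm]

-- A's first loop never moves k backwards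
theorem aLoop1_le (m n : Int) : ∀ (f : Nat) (k : Int), k ≤ aLoop1 m n f k := by
  intro f
  induction f with
  | zero => intro k; exact le_rfl
  | succ f ih =>
    intro k
    rw [aLoop1]
    by_cases h1 : k ≤ m
    · rw [if_pos h1]
      by_cases h2 : n ≤ combination m k
      · rw [if_pos h2]
      · rw [if_neg h2]; exact le_trans (by omega) (ih (k + 1))
    · rw [if_neg h1]

-- extra fuel is irrelevant for A's second loop
theorem aLoop2_fuel_succ (m n : Int) : ∀ (f : Nat) (k : Int) (acc : List Int),
    (m + 1 - k).toNat ≤ f → aLoop2 m n (f + 1) k acc = aLoop2 m n f k acc := by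
  intro f
  induction f with
  | zero =>
    intro k acc h
    have hk : ¬ k ≤ m := by omega
    conv_lhs => rw [aLoop2]
    rw [if_neg hk]; rfl
  | succ f ih =>
    intro k acc h
    conv_lhs => rw [aLoop2]
    conv_rhs => rw [aLoop2]
    by_cases h1 : k ≤ m
    · rw [if_pos h1, if_pos h1]
      by_cases h2 : n ≤ combination m k
      · rw [if_pos h2, if_pos h2]
        exact ih (k + 1) (acc ++ [k]) (by omega)
      · rw [if_neg h2, if_neg h2]
    · rw [if_neg h1, if_neg h1]

-- once acc is nonempty the reference loop is A's second loop
theorem phase_collect (m n : Int) : ∀ (f : Nat) (k : Int) (acc : List Int),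
    acc ≠ [] → phase m n f k acc = aLoop2 m n f k acc := by
  intro f
  induction f with
  | zero => intro k acc _; rfl
  | succ f ih =>
    intro k acc hacc
    rw [phase, aLoop2]
    have hiff : k < m + 1 ↔ k ≤ m := by omega
    by_cases h1 : k ≤ m
    · rw [if_pos (hiff.mpr h1), if_pos h1]
      by_cases h2 : n ≤ combination m k
      · rw [if_pos h2, if_pos h2]
        exact ih (k + 1) (acc ++ [k]) (by simp)
      · rw [if_neg h2, if_neg h2, if_neg (by simpa [List.isEmpty_iff] using hacc)]
    · rw [if_neg (fun h => h1 (hiff.mp h)), if_neg h1]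

-- with empty acc the reference loop is A's two loops in sequence
theorem phase_loops (m n : Int) : ∀ (f : Nat) (k : Int),
    (m + 1 - k).toNat ≤ f → phase m n f k [] = aLoop2 m n f (aLoop1 m n f k) [] := by
  intro f
  induction f with
  | zero =>
    intro k h
    rw [phase, aLoop1, aLoop2]
  | succ f ih =>
    intro k h
    rw [phase, aLoop1]
    by_cases h1 : k ≤ m
    · rw [if_pos (by omega : k < m + 1), if_pos h1]
      by_cases h2 : n ≤ combination m k
      · rw [if_pos h2, if_pos h2]
        rw [phase_collect m n f (k + 1) ([] ++ [k]) (by simp)]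
        rw [aLoop2, if_pos h1, if_pos h2]
      · rw [if_neg h2, if_neg h2]
        simp only [List.isEmpty_nil, if_pos]
        rw [ih (k + 1) (by omega)]
        have hk1 : k + 1 ≤ aLoop1 m n f (k + 1) := aLoop1_le m n f (k + 1)
        rw [aLoop2_fuel_succ m n f _ [] (by omega)]
    · rw [if_neg (by omega : ¬ k < m + 1), if_neg h1]
      rw [aLoop2, if_neg h1]

theorem main_eq (m n : Int) : find_possible_k_values m n = find_possible_k_values_alt m n := by
  unfold find_possible_k_values find_possible_k_values_alt
  by_cases hm : 0 ≤ m
  · rw [← phase_loops m n (m + 1).toNat 0 (by omega)]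
    rw [← bLoop_eq_phase m n (m + 1).toNat 0 1 [] le_rfl
        (fun h => (combination_zero m hm).symm)]
  · have h0 : (m + 1).toNat = 0 := by omega
    rw [h0]; rfl

-- ===== VERDICT (by name: the statement is the Claim_ definition above) =====
theorem find_possible_k_values_spec : Claim_equal_find_possible_k_values := by
  intro m n _ _
  unfold Spec_find_possible_k_values
  exact main_eq m n
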